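-- pv_equiv track=rewrite | github.com/NehaPatidar208/Company_coding_question | 004NCETb2.py | b2Pottykrgai
-- ===== SOURCE A (Python) =====
-- import math
--
-- def isPrime(num):
--     if (num==1):
--         return False
--     if(num==2 or num==3):
--         return True
--     for i in range(2,math.floor(num/2)+1):
--         if(num%i==0):
--             return False
--     return True
--
-- def b2Pottykrgai(s,n):
--
--     l1=[]
--     l2=[]
--     for i in s:
--         t=ord(i)
--         if(isPrime(t)==True):
--             l1.append(i)
--         else:
--             l2.append(i)
--     l1.sort()
--     l2.sort(reverse=True)
--     str=''.join(l1)
--     str+=''.join(l2)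
--
--     return str
-- ===== SOURCE B (Python) =====
-- import math
--
-- def b2Pottykrgai(s, n):
--     # sort once; primes ascending from the sorted list, non-primes descending from its reverse
--     srt = sorted(s)
--     l1 = [c for c in srt if _is_prime(ord(c))]
--     l2 = [c for c in reversed(srt) if not _is_prime(ord(c))]
--     return ''.join(l1) + ''.join(l2)
--
-- def _is_prime(t):
--     return t >= 2 and all(t % i for i in range(2, math.isqrt(t) + 1))
-- ===== Notes on version B (the rewrite author's own statement) =====
-- stated objective: alternative
-- what changed: A partitions the characters by prime ASCII code and runs two separate sorts (ascending and descending); B sorts the whole string once and extracts the prime characters by a forward filter and the non-prime ones by a filter over the reversed sorted list, also replacing A's t/2 trial division with an isqrt-bounded one.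
import Mathlib
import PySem

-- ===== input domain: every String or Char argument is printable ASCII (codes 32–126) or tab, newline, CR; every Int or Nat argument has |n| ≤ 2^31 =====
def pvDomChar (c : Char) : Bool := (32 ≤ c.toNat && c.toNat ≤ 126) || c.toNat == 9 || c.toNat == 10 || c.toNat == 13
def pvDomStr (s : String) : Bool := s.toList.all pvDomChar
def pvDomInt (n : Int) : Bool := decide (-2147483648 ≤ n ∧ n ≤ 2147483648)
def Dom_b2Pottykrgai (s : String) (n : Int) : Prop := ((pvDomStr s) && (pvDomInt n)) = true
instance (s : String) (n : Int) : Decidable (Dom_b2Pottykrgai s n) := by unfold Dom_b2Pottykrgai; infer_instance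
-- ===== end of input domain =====

-- B partitions via one sort of the whole string plus two filtering passes (forward for primes,
-- over the reversed sorted list for non-primes) instead of A's partition-then-two-sorts;
-- B's trial division runs to isqrt(t) instead of A's t/2.

-- ===== PORT A =====
def isPrimeA (num : Int) : Bool :=
  if num == 1 then false
  else if num == 2 || num == 3 then true
  else (PySem.List.pyRange 2 (PySem.Int.floordiv num 2 + 1) 1).all
        (fun i => !(PySem.Int.mod num i == 0))

def b2Pottykrgai (s : String) (n : Int) : String :=
  let p := s.toList.foldl
    (fun (acc : List Char × List Char) i =>
      let t : Int := (i.toNat : Int)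
      if isPrimeA t == true then (acc.1 ++ [i], acc.2) else (acc.1, acc.2 ++ [i]))
    ([], [])
  let l1 := PySem.List.sorted p.1 (fun c => c) false
  let l2 := PySem.List.sorted p.2 (fun c => c) true
  String.mk (PySem.Chars.join [] (l1.map (fun c => [c])) ++
             PySem.Chars.join [] (l2.map (fun c => [c])))

-- ===== PORT B =====
-- kernel-reducible port of math.isqrt (largest i with i*i ≤ n); exact on Nat
def pyIsqrt (n : Nat) : Nat :=
  (List.range (n + 1)).foldl (fun acc i => if i * i ≤ n then i else acc) 0

def isPrimeB (t : Int) : Bool :=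
  decide (2 ≤ t) &&
    (PySem.List.pyRange 2 ((pyIsqrt t.toNat : Int) + 1) 1).all
      (fun i => !(PySem.Int.mod t i == 0))

def b2Pottykrgai_alt (s : String) (n : Int) : String :=
  let srt := PySem.List.sorted s.toList (fun c => c) false
  let l1 := srt.filter (fun c => isPrimeB ((c.toNat : Int)))
  let l2 := srt.reverse.filter (fun c => !isPrimeB ((c.toNat : Int)))
  String.mk (PySem.Chars.join [] (l1.map (fun c => [c])) ++
             PySem.Chars.join [] (l2.map (fun c => [c])))

-- ===== PRECONDITION & SPEC =====
def Spec_b2Pottykrgai (s : String) (n : Int) (out : String) : Prop := out = b2Pottykrgai_alt s n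
instance (s : String) (n : Int) (out : String) : Decidable (Spec_b2Pottykrgai s n out) := by unfold Spec_b2Pottykrgai; infer_instance

-- ===== CLAIM (what is proved, stated in full; the proofs are below) =====
def Claim_equal_b2Pottykrgai : Prop := ∀ (s : String) (n : Int), Dom_b2Pottykrgai s n → Spec_b2Pottykrgai s n (b2Pottykrgai s n)

-- ===== LEMMAS AND PROOFS =====

-- the two prime tests agree on every character code the domain admits
theorem primeAgree : ∀ m : Nat, m < 127 → 9 ≤ m →
    isPrimeA (m : Int) = isPrimeB (m : Int) := by decide

theorem domChar_codes (c : Char) (h : pvDomChar c = true) :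
    c.toNat < 127 ∧ 9 ≤ c.toNat := by
  simp [pvDomChar] at h
  omega

-- A's partition loop is the pair of filters
theorem partition_foldl (cs : List Char) (a b : List Char) :
    cs.foldl
      (fun (acc : List Char × List Char) i =>
        let t : Int := (i.toNat : Int)
        if isPrimeA t == true then (acc.1 ++ [i], acc.2) else (acc.1, acc.2 ++ [i]))
      (a, b)
    = (a ++ cs.filter (fun c => isPrimeA ((c.toNat : Int))),
       b ++ cs.filter (fun c => !isPrimeA ((c.toNat : Int)))) := by
  induction cs generalizing a b with
  | nil => simp
  | cons c cs ih =>
    by_cases h : isPrimeA ((c.toNat : Int)) = true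
    · have hacc : (let t : Int := (c.toNat : Int)
          if isPrimeA t == true then (((a, b) : List Char × List Char).1 ++ [c], (a, b).2)
          else ((a, b).1, (a, b).2 ++ [c])) = ((a ++ [c], b) : List Char × List Char) := by
        simp [h]
      rw [List.foldl_cons, hacc, ih]
      simp [h]
    · have hacc : (let t : Int := (c.toNat : Int)
          if isPrimeA t == true then (((a, b) : List Char × List Char).1 ++ [c], (a, b).2)
          else ((a, b).1, (a, b).2 ++ [c])) = ((a, b ++ [c]) : List Char × List Char) := by
        simp [h]
      rw [List.foldl_cons, hacc, ih]
      simp only [Bool.not_eq_true] at h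
      simp [h]

-- sorting a filtered list = filtering the sorted list (ascending)
theorem sorted_filter (cs : List Char) (p : Char → Bool) :
    PySem.List.sorted (cs.filter p) (fun c => c) false
      = (PySem.List.sorted cs (fun c => c) false).filter p := by
  apply PySem.List.sorted_id_eq_of_perm_of_pairwise
  · exact (PySem.List.sorted_perm cs (fun c => c) false).filter p
  · exact (PySem.List.sorted_pairwise cs (fun c => c)).sublist List.filter_sublist

-- descending sort of a filtered list = filtering the reversed ascending-sorted list
theorem sorted_rev_filter (cs : List Char) (p : Char → Bool) :
    PySem.List.sorted (cs.filter p) (fun c => c) true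
      = ((PySem.List.sorted cs (fun c => c) false).reverse.filter p) := by
  have hperm : (PySem.List.sorted (cs.filter p) (fun c => c) true).Perm
      ((PySem.List.sorted cs (fun c => c) false).reverse.filter p) := by
    refine (PySem.List.sorted_perm _ _ _).trans ?_
    refine ((PySem.List.sorted_perm cs (fun c => c) false).filter p).symm.trans ?_
    exact (((PySem.List.sorted cs (fun c => c) false).reverse_perm).filter p).symm
  have hL : (PySem.List.sorted (cs.filter p) (fun c => c) true).Pairwise
      (fun a b => b ≤ a) :=
    PySem.List.sorted_pairwise_rev (cs.filter p) (fun c => c)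
  have hR : ((PySem.List.sorted cs (fun c => c) false).reverse.filter p).Pairwise
      (fun a b => b ≤ a) := by
    refine List.Pairwise.sublist List.filter_sublist ?_
    exact (List.pairwise_reverse).mpr (PySem.List.sorted_pairwise cs (fun c => c))
  have hrev : (PySem.List.sorted (cs.filter p) (fun c => c) true).reverse
      = ((PySem.List.sorted cs (fun c => c) false).reverse.filter p).reverse := by
    apply PySem.List.eq_of_perm_of_pairwise_le_of_injective (fun c : Char => c)
      (fun _ _ h => h)
    · exact (List.reverse_perm _).trans (hperm.trans (List.reverse_perm _).symm)
    · exact (List.pairwise_reverse).mpr hL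
    · exact (List.pairwise_reverse).mpr hR
  exact List.reverse_injective hrev

theorem filter_agree (cs : List Char) (h : ∀ c ∈ cs, pvDomChar c = true) :
    cs.filter (fun c => isPrimeA ((c.toNat : Int)))
      = cs.filter (fun c => isPrimeB ((c.toNat : Int))) := by
  apply List.filter_congr
  intro c hc
  obtain ⟨h1, h2⟩ := domChar_codes c (h c hc)
  exact primeAgree c.toNat h1 h2

theorem filter_agree_not (cs : List Char) (h : ∀ c ∈ cs, pvDomChar c = true) :
    cs.filter (fun c => !isPrimeA ((c.toNat : Int)))
      = cs.filter (fun c => !isPrimeB ((c.toNat : Int))) := by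
  apply List.filter_congr
  intro c hc
  obtain ⟨h1, h2⟩ := domChar_codes c (h c hc)
  rw [primeAgree c.toNat h1 h2]

-- ===== VERDICT (by name: the statement is the Claim_ definition above) =====
theorem b2Pottykrgai_spec : Claim_equal_b2Pottykrgai := by
  intro s n hdom
  have hchars : ∀ c ∈ s.toList, pvDomChar c = true := by
    unfold Dom_b2Pottykrgai at hdom
    simp only [Bool.and_eq_true, pvDomStr, List.all_eq_true] at hdom
    exact fun c hc => hdom.1 c hc
  show b2Pottykrgai s n = b2Pottykrgai_alt s n
  unfold b2Pottykrgai b2Pottykrgai_alt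
  simp only [partition_foldl, List.nil_append]
  rw [filter_agree _ hchars, filter_agree_not _ hchars,
      sorted_filter, sorted_rev_filter]
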